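-- pv_equiv track=rewrite | github.com/Aayushch23/The-Frame-Problem | initList.py | incrementBL
-- ===== SOURCE A (Python) =====
-- def incrementBL(list,baseList):
--     temp = list.copy()
--     if list[0] < baseList[0]-1:
--         temp[0] += 1
--     else:
--         temp[0] = 0    # carry
--         temp[1:] = incrementBL(temp[1:],baseList[1:])
--     return temp
-- ===== SOURCE B (Python) =====
-- def incrementBL(list, baseList):
--     # scan for the first position where no carry is needed, then build the
--     # result as zeros + incremented digit + untouched tail
--     i = 0
--     while list[i] >= baseList[i] - 1:
--         i += 1
--     return [0] * i + [list[i] + 1] + list[i + 1:]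
-- ===== Notes on version B (the rewrite author's own statement) =====
-- stated objective: alternative
-- what changed: Replaces the recursion with copy and slice-assignment at every carry step by a single scan for the first non-carrying position followed by one concatenation building the result; only long carry chains benefit, so measured speed is comparable on random inputs.
import Mathlib
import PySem

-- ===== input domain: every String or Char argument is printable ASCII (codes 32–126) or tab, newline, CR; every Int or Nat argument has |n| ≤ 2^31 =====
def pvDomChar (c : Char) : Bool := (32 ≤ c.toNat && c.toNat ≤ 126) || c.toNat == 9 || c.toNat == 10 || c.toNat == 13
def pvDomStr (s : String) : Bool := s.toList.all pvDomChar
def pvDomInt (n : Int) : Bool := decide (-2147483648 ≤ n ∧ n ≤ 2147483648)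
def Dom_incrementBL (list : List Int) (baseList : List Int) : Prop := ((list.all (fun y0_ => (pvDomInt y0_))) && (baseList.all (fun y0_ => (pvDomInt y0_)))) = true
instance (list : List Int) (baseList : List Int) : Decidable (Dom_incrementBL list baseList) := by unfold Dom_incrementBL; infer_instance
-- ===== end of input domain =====

-- B replaces A's recursion-with-copy-and-slice-assignment by one scan for the
-- first non-carrying position plus a single concatenation (alternative structure;
-- measured speed comparable on random inputs).

-- ===== PORT A =====
-- A recurses: on empty list or empty baseList (when reached) Python raises
-- IndexError; those inputs are excluded by Pre_ below, the port returns [] there.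
def incrementBL (list : List Int) (baseList : List Int) : List Int :=
  match list, baseList with
  | x :: xs, b :: bs =>
      if x < b - 1 then (x + 1) :: xs          -- temp[0] += 1
      else 0 :: incrementBL xs bs               -- temp[0] = 0; temp[1:] = incrementBL(temp[1:], baseList[1:])
  | _, _ => []                                  -- Python raises IndexError here (outside Pre_)

-- ===== PORT B =====
-- the while loop: advance i while list[i] >= baseList[i]-1; if either index
-- runs off the end Python raises IndexError (outside Pre_), modelled by the
-- result index falling out of range.
def stopIdxBL : List Int → List Int → Nat
  | x :: xs, b :: bs => if x ≥ b - 1 then stopIdxBL xs bs + 1 else 0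
  | [], _ => 0
  | _ :: _, [] => 0

def incrementBL_alt (list : List Int) (baseList : List Int) : List Int :=
  let i := stopIdxBL list baseList
  match PySem.List.pyGet? list (Int.ofNat i) with   -- list[i]
  | some x => List.replicate i 0 ++ [x + 1] ++ list.drop (i + 1)  -- [0]*i + [list[i]+1] + list[i+1:]
  | none => []                                  -- Python raises IndexError here (outside Pre_)

-- ===== PRECONDITION & SPEC =====
-- Pre_ holds exactly when A returns (both raise IndexError otherwise): the carry
-- stops at some position i before either list runs out.
def Pre_incrementBL (list : List Int) (baseList : List Int) : Prop :=
  ∃ i ∈ List.range list.length,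
    i < baseList.length ∧ list.getD i 0 < baseList.getD i 0 - 1 ∧
    ∀ j ∈ List.range i, list.getD j 0 ≥ baseList.getD j 0 - 1
instance (list : List Int) (baseList : List Int) : Decidable (Pre_incrementBL list baseList) := by
  unfold Pre_incrementBL; infer_instance
def pvWitness_incrementBL : List Int × List Int := ([1, 0], [2, 3])
def Spec_incrementBL (list : List Int) (baseList : List Int) (out : List Int) : Prop := out = incrementBL_alt list baseList
instance (list : List Int) (baseList : List Int) (out : List Int) : Decidable (Spec_incrementBL list baseList out) := by unfold Spec_incrementBL; infer_instance

-- ===== CLAIM (what is proved, stated in full; the proofs are below) =====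
def Claim_equal_incrementBL : Prop := ∀ (list : List Int) (baseList : List Int), Dom_incrementBL list baseList → Pre_incrementBL list baseList → Spec_incrementBL list baseList (incrementBL list baseList)

-- ===== LEMMAS AND PROOFS =====

-- under Pre_, the stop index is in range of both lists
theorem stopIdxBL_lt (list baseList : List Int) (h : Pre_incrementBL list baseList) :
    stopIdxBL list baseList < list.length := by
  induction list generalizing baseList with
  | nil => obtain ⟨i, hi, _⟩ := h; simp at hi
  | cons x xs ih =>
    obtain ⟨i, hi, hib, hlt, hcar⟩ := h
    simp only [List.mem_range] at hi hcar
    cases baseList with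
    | nil => simp at hib
    | cons b bs =>
      simp only [stopIdxBL]
      by_cases hx : x ≥ b - 1
      · -- i ≠ 0, so i-1 witnesses Pre_ for xs bs
        have hi0 : i ≠ 0 := by
          intro h0; subst h0; simp at hlt; omega
        have hpre : Pre_incrementBL xs bs := by
          refine ⟨i - 1, ?_, ?_, ?_, ?_⟩
          · simp only [List.mem_range]; simp at hi; omega
          · simp at hib; omega
          · have : (x :: xs).getD i 0 = xs.getD (i - 1) 0 := by
              cases i with | zero => omega | succ n => simp
            have hb : (b :: bs).getD i 0 = bs.getD (i - 1) 0 := by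
              cases i with | zero => omega | succ n => simp
            rw [this, hb] at hlt; exact hlt
          · intro j hj; simp only [List.mem_range] at hj
            have := hcar (j + 1) (by omega)
            simpa using this
        have := ih bs hpre
        simp only [List.length_cons]
        rw [if_pos hx]; omega
      · rw [if_neg hx]; simp

-- A equals B on Pre_
theorem incrementBL_eq (list baseList : List Int) (h : Pre_incrementBL list baseList) :
    incrementBL list baseList = incrementBL_alt list baseList := by
  induction list generalizing baseList with
  | nil => obtain ⟨i, hi, _⟩ := h; simp at hi
  | cons x xs ih =>
    obtain ⟨i, hi, hib, hlt, hcar⟩ := h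
    simp only [List.mem_range] at hi hcar
    cases baseList with
    | nil => simp at hib
    | cons b bs =>
      by_cases hx : x < b - 1
      · -- stop immediately: both yield (x+1) :: xs
        simp [incrementBL, incrementBL_alt, stopIdxBL, hx, PySem.List.pyGet?,
          PySem.List.pyIdx?, show ¬ x ≥ b - 1 by omega]
      · have hi0 : i ≠ 0 := by
          intro h0; subst h0; simp at hlt; omega
        have hpre : Pre_incrementBL xs bs := by
          refine ⟨i - 1, ?_, ?_, ?_, ?_⟩
          · simp only [List.mem_range]; simp at hi; omega
          · simp at hib; omega
          · have h1 : (x :: xs).getD i 0 = xs.getD (i - 1) 0 := by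
              cases i with | zero => omega | succ n => simp
            have h2 : (b :: bs).getD i 0 = bs.getD (i - 1) 0 := by
              cases i with | zero => omega | succ n => simp
            rw [h1, h2] at hlt; exact hlt
          · intro j hj; simp only [List.mem_range] at hj
            have := hcar (j + 1) (by omega)
            simpa using this
        have hstop := stopIdxBL_lt xs bs hpre
        have hrec := ih bs hpre
        -- both sides prepend a 0 and recurse/shift
        have hget : PySem.List.pyGet? xs (Int.ofNat (stopIdxBL xs bs)) =
            some (xs.getD (stopIdxBL xs bs) 0) := by
          simp [PySem.List.pyGet?, PySem.List.pyIdx?, hstop, List.getD]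
        have hgetc : PySem.List.pyGet? (x :: xs) (Int.ofNat (stopIdxBL xs bs + 1)) =
            some (xs.getD (stopIdxBL xs bs) 0) := by
          have h01 : (0:Int) ≤ (stopIdxBL xs bs : Int) + 1 := by positivity
          simp [PySem.List.pyGet?, PySem.List.pyIdx?, h01, hstop, List.getD]
        simp only [incrementBL, incrementBL_alt, stopIdxBL, if_neg hx,
          if_pos (show x ≥ b - 1 by omega)] at *
        rw [hrec]
        simp only [hget, hgetc]
        simp [List.replicate_succ]

-- ===== VERDICT (by name: the statement is the Claim_ definition above) =====
theorem incrementBL_spec : Claim_equal_incrementBL := by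
  intro list baseList _ hpre
  unfold Spec_incrementBL
  exact incrementBL_eq list baseList hpre
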